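-- pv_equiv track=rewrite | github.com/Jonkua/mdna-extractionv2 | src/parsers/enhanced_text_normalizer.py | _clean_excessive_empty_lines
-- ===== SOURCE A (Python) =====
-- from typing import List, Set, Tuple
--
-- def _clean_excessive_empty_lines(lines: List[str]) -> List[str]:
--     """Clean up excessive empty lines while preserving table structure."""
--     result = []
--     empty_count = 0
--
--     for line in lines:
--         if not line.strip():
--             empty_count += 1
--             # Allow more empty lines around tables
--             if empty_count <= 3:  # Increased from 2
--                 result.append(line)
--         else:
--             empty_count = 0
--             result.append(line)
--
--     return result
-- ===== SOURCE B (Python) =====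
-- from typing import List, Set, Tuple
--
-- def _clean_excessive_empty_lines(lines: List[str]) -> List[str]:
--     """Clean up excessive empty lines while preserving table structure.
--
--     Run-segmentation rewrite: scan for maximal runs of empty lines and keep
--     only the first 3 of each run via slicing; non-empty lines pass through.
--     """
--     result = []
--     i = 0
--     n = len(lines)
--     while i < n:
--         if lines[i].strip():
--             result.append(lines[i])
--             i += 1
--         else:
--             j = i
--             while j < n and not lines[j].strip():
--                 j += 1
--             result += lines[i:j][:3]
--             i = j
--     return result
-- ===== Notes on version B (the rewrite author's own statement) =====
-- stated objective: alternative
-- what changed: Replaces the running empty-line counter with explicit run segmentation: an outer scan finds each maximal run of empty lines and appends its first 3 lines by slicing, instead of counting empties line-by-line.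
import Mathlib
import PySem

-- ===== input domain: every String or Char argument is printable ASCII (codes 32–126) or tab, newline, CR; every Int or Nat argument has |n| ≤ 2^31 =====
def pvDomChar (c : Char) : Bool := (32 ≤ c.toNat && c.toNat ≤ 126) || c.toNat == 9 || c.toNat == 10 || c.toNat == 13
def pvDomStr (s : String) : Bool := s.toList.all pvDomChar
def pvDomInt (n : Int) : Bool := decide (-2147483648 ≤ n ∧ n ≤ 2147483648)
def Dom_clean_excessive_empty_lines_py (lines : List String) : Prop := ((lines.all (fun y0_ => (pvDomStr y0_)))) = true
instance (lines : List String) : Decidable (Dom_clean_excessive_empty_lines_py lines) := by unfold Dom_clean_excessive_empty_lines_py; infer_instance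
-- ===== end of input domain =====

-- B replaces A's running empty-line counter with explicit run segmentation (take/drop of each maximal empty run); alternative decomposition, same cost.


-- ===== PORT A =====
-- literal transliteration of A: fold over the lines carrying (result, empty_count)
def clean_excessive_empty_lines_py (lines : List String) : List String :=
  (lines.foldl
    (fun (st : List String × Int) line =>
      if PySem.Str.strip line = "" then
        let ec := st.2 + 1
        (if ec ≤ 3 then st.1 ++ [line] else st.1, ec)
      else
        (st.1 ++ [line], 0))
    ([], 0)).1

-- ===== PORT B =====
-- "not lines[j].strip()" : the line is empty after stripping
def pvEmptyLine (s : String) : Bool := PySem.Str.strip s == ""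

-- transliteration of B: outer scan; a non-empty line passes through, an empty
-- line starts a maximal empty run (inner scan = takeWhile/dropWhile) of which
-- the first 3 lines (slice [:3]) are kept
def clean_excessive_empty_lines_py_alt (lines : List String) : List String :=
  match lines with
  | [] => []
  | l :: rest =>
    if PySem.Str.strip l ≠ "" then
      l :: clean_excessive_empty_lines_py_alt rest
    else
      ((l :: rest).takeWhile pvEmptyLine).take 3
        ++ clean_excessive_empty_lines_py_alt ((l :: rest).dropWhile pvEmptyLine)
termination_by lines.length
decreasing_by
  · simp
  · simp only [List.dropWhile_cons]
    have h : pvEmptyLine l = true := by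
      simp [pvEmptyLine]; simpa using (by simpa using ‹¬ PySem.Str.strip l ≠ ""›)
    simp [h]
    exact rest.length_dropWhile_le pvEmptyLine

-- ===== PRECONDITION & SPEC =====
def Spec_clean_excessive_empty_lines_py (lines : List String) (out : List String) : Prop := out = clean_excessive_empty_lines_py_alt lines
instance (lines : List String) (out : List String) : Decidable (Spec_clean_excessive_empty_lines_py lines out) := by unfold Spec_clean_excessive_empty_lines_py; infer_instance

-- ===== CLAIM (what is proved, stated in full; the proofs are below) =====
def Claim_equal_clean_excessive_empty_lines_py : Prop := ∀ (lines : List String), Dom_clean_excessive_empty_lines_py lines → Spec_clean_excessive_empty_lines_py lines (clean_excessive_empty_lines_py lines)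

-- ===== LEMMAS AND PROOFS =====

-- A's loop, written as a recursion producing only the appended suffix, with the counter explicit
def pvGo (c : Int) : List String → List String
  | [] => []
  | l :: rest =>
    if PySem.Str.strip l = "" then
      (if c + 1 ≤ 3 then [l] else []) ++ pvGo (c + 1) rest
    else
      l :: pvGo 0 rest

theorem pvFoldl_eq_go (ls : List String) : ∀ (res : List String) (c : Int),
    (ls.foldl
      (fun (st : List String × Int) line =>
        if PySem.Str.strip line = "" then
          let ec := st.2 + 1
          (if ec ≤ 3 then st.1 ++ [line] else st.1, ec)
        else
          (st.1 ++ [line], 0))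
      (res, c)).1 = res ++ pvGo c ls := by
  induction ls with
  | nil => intro res c; simp [pvGo]
  | cons l rest ih =>
    intro res c
    simp only [List.foldl_cons]
    by_cases h : PySem.Str.strip l = ""
    · by_cases h3 : c + 1 ≤ 3
      · simp only [if_pos h, if_pos h3]
        rw [ih]; simp [pvGo, h, h3]
      · simp only [if_pos h, if_neg h3]
        rw [ih]; simp [pvGo, h, h3]
    · simp only [if_neg h]
      rw [ih]; simp [pvGo, h]

-- the run lemma: from counter c (0 ≤ c), A's loop keeps the first (3-c) lines of the
-- current maximal empty run and then continues with counter 0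
theorem pvGo_run (ls : List String) : ∀ (c : Int), 0 ≤ c →
    pvGo c ls = (ls.takeWhile pvEmptyLine).take (3 - c).toNat
      ++ pvGo 0 (ls.dropWhile pvEmptyLine) := by
  induction ls with
  | nil => intro c _; simp [pvGo]
  | cons l rest ih =>
    intro c hc
    by_cases h : PySem.Str.strip l = ""
    · have he : pvEmptyLine l = true := by simp [pvEmptyLine, h]
      rw [pvGo, if_pos h, ih (c + 1) (by omega)]
      simp only [List.takeWhile_cons, List.dropWhile_cons, he, if_pos]
      by_cases h3 : c + 1 ≤ 3
      · have : (3 - c).toNat = (3 - (c + 1)).toNat + 1 := by omega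
        simp [h3, this]
      · have : (3 - c).toNat = 0 := by omega
        simp [h3, this, Int.toNat_of_nonpos (by omega : 3 - (c+1) ≤ 0)]
    · have he : pvEmptyLine l = false := by simp [pvEmptyLine, h]
      rw [pvGo, if_neg h]
      simp only [List.takeWhile_cons, List.dropWhile_cons, he]
      simp [pvGo, h]

theorem pvGo_eq_alt (n : Nat) : ∀ (ls : List String), ls.length ≤ n →
    pvGo 0 ls = clean_excessive_empty_lines_py_alt ls := by
  induction n with
  | zero =>
    intro ls h
    have : ls = [] := List.eq_nil_of_length_eq_zero (Nat.le_zero.mp h)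
    simp [this, pvGo, clean_excessive_empty_lines_py_alt]
  | succ n ih =>
    intro ls h
    match ls with
    | [] => simp [pvGo, clean_excessive_empty_lines_py_alt]
    | l :: rest =>
      by_cases hl : PySem.Str.strip l = ""
      · have he : pvEmptyLine l = true := by simp [pvEmptyLine, hl]
        rw [pvGo_run (l :: rest) 0 (by omega)]
        rw [clean_excessive_empty_lines_py_alt]
        rw [if_neg (by simpa using hl)]
        have hd : ((l :: rest).dropWhile pvEmptyLine).length ≤ n := by
          simp only [List.dropWhile_cons, he, if_pos]
          have := rest.length_dropWhile_le pvEmptyLine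
          simp at h; omega
        rw [ih _ hd]
        norm_num [show ((3:Int)).toNat = 3 from rfl]
      · rw [pvGo, if_neg hl, clean_excessive_empty_lines_py_alt,
            if_pos (by simpa using hl)]
        have : rest.length ≤ n := by simp at h; omega
        rw [ih rest this]

-- ===== VERDICT (by name: the statement is the Claim_ definition above) =====
theorem clean_excessive_empty_lines_py_spec : Claim_equal_clean_excessive_empty_lines_py := by
  intro lines _
  unfold Spec_clean_excessive_empty_lines_py clean_excessive_empty_lines_py
  rw [pvFoldl_eq_go, List.nil_append, pvGo_eq_alt lines.length lines (le_refl _)]
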